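-- pv_equiv track=rewrite | github.com/Kiwadqwe/Algorithm | programmers/2018 카카오 채용/프렌즈4블록_17679.py | solution
-- ===== SOURCE A (Python) =====
-- from collections import deque
--
-- def solution(m, n, board):
--     answer = 0
--     board = list(map(list,board))
--     s = set()
--
--     while True:
--         for i in range(m-1):
--             for j in range(n-1):
--                 if board[i][j] == board[i][j+1] == board[i+1][j] == board[i+1][j+1] != '0':
--                     s |= set([(i,j),(i,j+1),(i+1,j),(i+1,j+1)])
--
--         if not len(s):
--             break
--
--         for x,y in s:
--             board[x][y] = '0'
--             answer+=1
--
--         for i in range(n):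
--             q = deque()
--
--             for j in range(m-1,-1,-1):
--                 if board[j][i] == '0':
--                     q.append((j,i))
--                 else:
--                     if q:
--                         x,y = q.popleft()
--                         board[x][y] = board[j][i]
--                         board[j][i] = '0'
--                         q.append((j,i))
--
--         s.clear()
--
--     return answer
-- ===== SOURCE B (Python) =====
-- def solution(m, n, board):
--     answer = 0
--     grid = [list(r) for r in board]
--     while True:
--         s = set()
--         for i in range(m-1):
--             for j in range(n-1):
--                 if grid[i][j] == grid[i][j+1] == grid[i+1][j] == grid[i+1][j+1] != '0':
--                     s |= set([(i,j),(i,j+1),(i+1,j),(i+1,j+1)])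
--         if not s:
--             return answer
--         answer += len(s)
--         for j in range(n):
--             col = [grid[i][j] for i in range(m-1,-1,-1) if (i,j) not in s and grid[i][j] != '0']
--             for i in range(m):
--                 grid[m-1-i][j] = col[i] if i < len(col) else '0'
-- ===== Notes on version B (the rewrite author's own statement) =====
-- stated objective: simpler
-- what changed: The separate clearing pass and the deque-based two-pointer bubbling gravity are replaced by a single per-column compaction: each column's surviving (unmarked, non-'0') cells are collected bottom-to-top and written back at the bottom, with the count taken as len(s) instead of per-cell increments.
import Mathlib
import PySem

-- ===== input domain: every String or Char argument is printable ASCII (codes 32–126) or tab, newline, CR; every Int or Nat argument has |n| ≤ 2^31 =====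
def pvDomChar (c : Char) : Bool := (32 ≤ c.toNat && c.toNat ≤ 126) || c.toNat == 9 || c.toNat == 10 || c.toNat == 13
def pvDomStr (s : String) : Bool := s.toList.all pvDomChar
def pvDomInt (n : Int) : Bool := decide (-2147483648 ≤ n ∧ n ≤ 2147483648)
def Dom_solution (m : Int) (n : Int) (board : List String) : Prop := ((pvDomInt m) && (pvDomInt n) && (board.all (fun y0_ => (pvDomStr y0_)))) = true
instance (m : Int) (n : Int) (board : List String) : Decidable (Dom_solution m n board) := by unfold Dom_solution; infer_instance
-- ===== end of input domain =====

-- B replaces A's clearing pass + deque two-pointer gravity by a single per-column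
-- compaction of the surviving cells (simpler decomposition; same complexity).
-- A also mutates nothing observable: it rebinds `board` locally, so return-value
-- equivalence is full equivalence.

-- ===== PORT A =====
-- board[x][y] read/write (all executed accesses are in range under Pre_; '0'/[] defaults are never read there)
def bGet (b : List (List Char)) (x y : Int) : Char :=
  PySem.List.pyGetD (PySem.List.pyGetD b x []) y '0'

def bSet (b : List (List Char)) (x y : Int) (v : Char) : List (List Char) :=
  PySem.List.pySetD b x (PySem.List.pySetD (PySem.List.pyGetD b x []) y v)

-- the 2x2 scan both Pythons share verbatim: s |= {(i,j),(i,j+1),(i+1,j),(i+1,j+1)}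
def scan2x2 (m n : Int) (b : List (List Char)) : PySem.Set (Int × Int) :=
  (PySem.List.pyRange 0 (m-1) 1).foldl (fun s i =>
    (PySem.List.pyRange 0 (n-1) 1).foldl (fun s j =>
      if bGet b i j = bGet b i (j+1) ∧ bGet b i (j+1) = bGet b (i+1) j ∧
         bGet b (i+1) j = bGet b (i+1) (j+1) ∧ bGet b (i+1) (j+1) ≠ '0' then
        PySem.Set.update s [(i,j), (i,j+1), (i+1,j), (i+1,j+1)]
      else s) s) PySem.Set.empty

-- A's gravity for one column i: deque of '0' slots, scanning rows m-1 .. 0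
def gravColA (m : Int) (b : List (List Char)) (i : Int) : List (List Char) :=
  ((PySem.List.pyRange (m-1) (-1) (-1)).foldl
    (fun (p : List (List Char) × List (Int × Int)) j =>
      if bGet p.1 j i = '0' then (p.1, p.2 ++ [(j, i)])
      else
        match p.2 with
        | [] => p
        | (x, y) :: qt => (bSet (bSet p.1 x y (bGet p.1 j i)) j i '0', qt ++ [(j, i)]))
    (b, [])).1

-- the `while True` loop; fuel is a termination device only (one unit per round, never
-- exhausted on inputs satisfying Pre_, where at most (cells/4)+1 rounds happen)
def loopA (fuel : Nat) (m n : Int) (b : List (List Char)) (answer : Int) : Int :=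
  match fuel with
  | 0 => answer
  | fuel + 1 =>
    let s := scan2x2 m n b
    if s.length = 0 then answer
    else
      let p := s.foldl (fun (p : List (List Char) × Int) xy => (bSet p.1 xy.1 xy.2 '0', p.2 + 1)) (b, answer)
      loopA fuel m n ((PySem.List.pyRange 0 n 1).foldl (gravColA m) p.1) p.2

def solution (m : Int) (n : Int) (board : List String) : Int :=
  let b := board.map String.toList
  loopA (b.foldl (fun a r => a + r.length) 0 + 1) m n b 0

-- ===== PORT B =====
-- col = [grid[i][j] for i in range(m-1,-1,-1) if (i,j) not in s and grid[i][j] != '0']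
def colListB (m : Int) (b : List (List Char)) (s : PySem.Set (Int × Int)) (j : Int) : List Char :=
  ((PySem.List.pyRange (m-1) (-1) (-1)).filter
      (fun i => !(PySem.Set.contains s (i, j)) && (bGet b i j != '0'))).map
    (fun i => bGet b i j)

-- for i in range(m): grid[m-1-i][j] = col[i] if i < len(col) else '0'
def dropColB (m : Int) (s : PySem.Set (Int × Int)) (b : List (List Char)) (j : Int) : List (List Char) :=
  let col := colListB m b s j
  (PySem.List.pyRange 0 m 1).foldl
    (fun b i => bSet b (m-1-i) j (if i < (col.length : Int) then PySem.List.pyGetD col i '0' else '0')) b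

def loopB (fuel : Nat) (m n : Int) (b : List (List Char)) (answer : Int) : Int :=
  match fuel with
  | 0 => answer
  | fuel + 1 =>
    let s := scan2x2 m n b
    if s.length = 0 then answer
    else loopB fuel m n ((PySem.List.pyRange 0 n 1).foldl (dropColB m s) b) (answer + s.length)

def solution_alt (m : Int) (n : Int) (board : List String) : Int :=
  let b := board.map String.toList
  loopB (b.foldl (fun a r => a + r.length) 0 + 1) m n b 0

-- ===== PRECONDITION & SPEC =====
-- Pre_ is exactly where A returns: when m ≥ 2 and n ≥ 2 the scan unconditionally reads
-- the whole top-left m×n block, so the board must have at least m rows whose first m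
-- rows have at least n cells; otherwise Python raises IndexError. For m ≤ 1 or n ≤ 1
-- nothing is ever accessed and A returns 0.
def Pre_solution (m : Int) (n : Int) (board : List String) : Prop :=
  2 ≤ m → 2 ≤ n → (m ≤ (board.length : Int) ∧ ∀ r ∈ board.take m.toNat, n ≤ (r.length : Int))
instance (m : Int) (n : Int) (board : List String) : Decidable (Pre_solution m n board) := by
  unfold Pre_solution; infer_instance

def pvWitness_solution : Int × Int × List String := (2, 2, ["AA", "AA"])

def Spec_solution (m : Int) (n : Int) (board : List String) (out : Int) : Prop := out = solution_alt m n board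
instance (m : Int) (n : Int) (board : List String) (out : Int) : Decidable (Spec_solution m n board out) := by unfold Spec_solution; infer_instance

-- ===== CLAIM (what is proved, stated in full; the proofs are below) =====
def Claim_equal_solution : Prop := ∀ (m : Int) (n : Int) (board : List String), Dom_solution m n board → Pre_solution m n board → Spec_solution m n board (solution m n board)

-- ===== LEMMAS AND PROOFS =====

def shapeOf (b : List (List Char)) : List Nat := b.map List.length

theorem getD_set {α : Type} (l : List α) (i j : Nat) (a d : α) :
    (l.set i a).getD j d = if i = j ∧ i < l.length then a else l.getD j d := by
  by_cases hij : i = j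
  · subst hij
    by_cases hlen : i < l.length
    · rw [if_pos ⟨rfl, hlen⟩, List.getD_eq_getElem?_getD, List.getElem?_set, if_pos rfl,
         if_pos hlen]
      simp
    · rw [if_neg (by tauto), List.getD_eq_getElem?_getD, List.getElem?_set, if_pos rfl,
         if_neg hlen, List.getD_eq_getElem?_getD, List.getElem?_eq_none (by omega)]
  · rw [if_neg (by tauto), List.getD_eq_getElem?_getD, List.getElem?_set, if_neg hij,
       List.getD_eq_getElem?_getD]

theorem bGet_bSet (b : List (List Char)) (x y p q : Int) (v : Char)
    (hx : 0 ≤ x) (hy : 0 ≤ y) (hp : 0 ≤ p) (hq : 0 ≤ q)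
    (hxr : x < (b.length : Int)) (hyr : y < ((b.getD x.toNat []).length : Int)) :
    bGet (bSet b x y v) p q = if p = x ∧ q = y then v else bGet b p q := by
  unfold bGet bSet
  rw [PySem.List.pySetD_of_nonneg _ _ hx, PySem.List.pySetD_of_nonneg _ _ hy,
      PySem.List.pyGetD_of_nonneg _ _ hp, PySem.List.pyGetD_of_nonneg _ _ hp,
      PySem.List.pyGetD_of_nonneg _ _ hq, PySem.List.pyGetD_of_nonneg _ _ hq,
      PySem.List.pyGetD_of_nonneg _ _ hx, getD_set]
  by_cases hpx : p = x
  · subst hpx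
    rw [if_pos ⟨rfl, by omega⟩, getD_set]
    by_cases hqy : q = y
    · subst hqy
      rw [if_pos ⟨rfl, by omega⟩, if_pos ⟨rfl, rfl⟩]
    · rw [if_neg (by intro h; exact hqy (by omega)), if_neg (by tauto)]
  · rw [if_neg (by intro h; exact hpx (by omega)), if_neg (by tauto)]

theorem shapeOf_bSet (b : List (List Char)) (x y : Int) (v : Char) (hx : 0 ≤ x) (hy : 0 ≤ y) :
    shapeOf (bSet b x y v) = shapeOf b := by
  unfold bSet shapeOf
  rw [PySem.List.pySetD_of_nonneg _ _ hx, PySem.List.pySetD_of_nonneg _ _ hy,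
      PySem.List.pyGetD_of_nonneg _ _ hx]
  apply List.ext_getElem (by simp)
  intro i h1 h2
  simp only [List.getElem_map, List.getElem_set]
  split_ifs with h
  · subst h
    simp [List.getD_eq_getElem?_getD, List.getElem?_eq_getElem (by simpa using h2)]
  · rfl

theorem length_of_shapeOf {b1 b2 : List (List Char)} (h : shapeOf b1 = shapeOf b2) :
    b1.length = b2.length := by
  have := congrArg List.length h; simpa [shapeOf] using this

theorem rowlen_of_shapeOf {b1 b2 : List (List Char)} (h : shapeOf b1 = shapeOf b2) (k : Nat) :
    (b1.getD k []).length = (b2.getD k []).length := by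
  have hl := length_of_shapeOf h
  by_cases hk : k < b1.length
  · have := congrArg (fun l => l.getD k 0) h
    simpa [shapeOf, List.getD_eq_getElem?_getD, List.getElem?_map,
      List.getElem?_eq_getElem hk, List.getElem?_eq_getElem (hl ▸ hk)] using this
  · rw [List.getD_eq_getElem?_getD, List.getElem?_eq_none (by omega),
       List.getD_eq_getElem?_getD, List.getElem?_eq_none (by omega)]

theorem boardExt {b1 b2 : List (List Char)} (h : shapeOf b1 = shapeOf b2)
    (hg : ∀ p q : Nat, bGet b1 (p : Int) (q : Int) = bGet b2 (p : Int) (q : Int)) : b1 = b2 := by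
  have hl := length_of_shapeOf h
  apply List.ext_getElem hl
  intro i h1 h2
  have hrl : b1[i].length = b2[i].length := by
    have := rowlen_of_shapeOf h i
    rwa [List.getD_eq_getElem?_getD, List.getElem?_eq_getElem h1, Option.getD_some,
        List.getD_eq_getElem?_getD, List.getElem?_eq_getElem h2, Option.getD_some] at this
  apply List.ext_getElem hrl
  intro j hj1 hj2
  have := hg i j
  simp only [bGet, PySem.List.pyGetD_natCast] at this
  rw [List.getD_eq_getElem?_getD, List.getD_eq_getElem?_getD, List.getD_eq_getElem?_getD,
     List.getD_eq_getElem?_getD] at this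
  rwa [List.getElem?_eq_getElem h1, Option.getD_some,
      List.getElem?_eq_getElem h2, Option.getD_some,
      List.getElem?_eq_getElem hj1, Option.getD_some,
      List.getElem?_eq_getElem hj2, Option.getD_some] at this

def clearL (b : List (List Char)) (l : List (Int × Int)) : List (List Char) :=
  l.foldl (fun b xy => bSet b xy.1 xy.2 '0') b

def inRangeB (b : List (List Char)) (xy : Int × Int) : Prop :=
  0 ≤ xy.1 ∧ xy.1 < (b.length : Int) ∧ 0 ≤ xy.2 ∧ xy.2 < ((b.getD xy.1.toNat []).length : Int)

theorem inRange_of_shapeOf {b1 b2 : List (List Char)} (h : shapeOf b1 = shapeOf b2) (xy : Int × Int)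
    (hr : inRangeB b1 xy) : inRangeB b2 xy := by
  obtain ⟨h1, h2, h3, h4⟩ := hr
  exact ⟨h1, by rw [← length_of_shapeOf h]; exact h2, h3, by rw [← rowlen_of_shapeOf h]; exact h4⟩

theorem shapeOf_clearL (b : List (List Char)) (l : List (Int × Int))
    (hl : ∀ xy ∈ l, 0 ≤ xy.1 ∧ 0 ≤ xy.2) : shapeOf (clearL b l) = shapeOf b := by
  induction l generalizing b with
  | nil => rfl
  | cons xy rest ih =>
    have h1 := hl xy (by simp)
    rw [clearL, List.foldl_cons]
    rw [show List.foldl (fun b xy => bSet b xy.1 xy.2 '0') (bSet b xy.1 xy.2 '0') rest =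
        clearL (bSet b xy.1 xy.2 '0') rest from rfl]
    rw [ih _ (fun p hp => hl p (by simp [hp])), shapeOf_bSet _ _ _ _ h1.1 h1.2]

theorem bGet_clearL (b : List (List Char)) (l : List (Int × Int)) (p q : Int)
    (hp : 0 ≤ p) (hq : 0 ≤ q) (hl : ∀ xy ∈ l, inRangeB b xy) :
    bGet (clearL b l) p q = if (p, q) ∈ l then '0' else bGet b p q := by
  induction l generalizing b with
  | nil => simp [clearL]
  | cons xy rest ih =>
    have h1 := hl xy (by simp)
    rw [clearL, List.foldl_cons]
    rw [show List.foldl (fun b xy => bSet b xy.1 xy.2 '0') (bSet b xy.1 xy.2 '0') rest =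
        clearL (bSet b xy.1 xy.2 '0') rest from rfl]
    rw [ih _ (fun r hr => inRange_of_shapeOf
        (shapeOf_bSet _ _ _ _ h1.1 h1.2.2.1).symm r (hl r (by simp [hr])))]
    rw [bGet_bSet _ _ _ _ _ _ h1.1 h1.2.2.1 hp hq h1.2.1 h1.2.2.2]
    cases xy
    by_cases hmem : (p, q) ∈ rest
    · simp [hmem]
    · simp only [List.mem_cons, hmem, or_false, Prod.mk.injEq]
      simp

def descR (m : Int) (t : Nat) : List Int := (List.range t).map (fun k => m - 1 - ((k : Nat) : Int))

def surv (b : List (List Char)) (m y : Int) (t : Nat) : List Char :=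
  ((descR m t).filter (fun r => bGet b r y != '0')).map (fun r => bGet b r y)

def stepA (y : Int) (p : List (List Char) × List (Int × Int)) (j : Int) :
    List (List Char) × List (Int × Int) :=
  if bGet p.1 j y = '0' then (p.1, p.2 ++ [(j, y)])
  else
    match p.2 with
    | [] => p
    | (x, y') :: qt => (bSet (bSet p.1 x y' (bGet p.1 j y)) j y '0', qt ++ [(j, y)])

theorem surv_length_le (b : List (List Char)) (m y : Int) (t : Nat) :
    (surv b m y t).length ≤ t := by
  simp only [surv, List.length_map]
  exact (List.length_filter_le _ _).trans (by simp [descR])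

theorem surv_succ (b : List (List Char)) (m y : Int) (t : Nat) :
    surv b m y (t+1) = surv b m y t ++
      (if bGet b (m - 1 - (t : Int)) y = '0' then [] else [bGet b (m - 1 - (t : Int)) y]) := by
  simp only [surv, descR, List.range_succ, List.map_append, List.filter_append, List.map_cons,
    List.map_nil, List.filter_cons]
  by_cases hv : bGet b (m - 1 - (t : Int)) y = '0'
  · simp [hv]
  · simp [hv, bne_iff_ne]

theorem getD_concat {α : Type} (l : List α) (a d : α) (i : Nat) (h : i = l.length) :
    (l ++ [a]).getD i d = a := by
  subst h; rw [List.getD_eq_getElem?_getD, List.getElem?_concat_length]; rfl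

theorem gravA_inv (m y : Int) (c : List (List Char)) (hy : 0 ≤ y)
    (hml : m ≤ (c.length : Int))
    (hrow : ∀ k : Nat, k < m.toNat → y < ((c.getD k []).length : Int))
    (t : Nat) (ht : t ≤ m.toNat) :
    (∀ k : Nat, k < t → bGet ((descR m t).foldl (stepA y) (c, [])).1 (m - 1 - (k : Int)) y
        = (surv c m y t).getD k '0')
    ∧ (∀ p q : Int, 0 ≤ p → 0 ≤ q → (q ≠ y ∨ p < m - t ∨ m ≤ p) →
        bGet ((descR m t).foldl (stepA y) (c, [])).1 p q = bGet c p q)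
    ∧ ((descR m t).foldl (stepA y) (c, [])).2
        = (List.range (t - (surv c m y t).length)).map
            (fun u => (m - 1 - (((surv c m y t).length + u : Nat) : Int), y))
    ∧ shapeOf ((descR m t).foldl (stepA y) (c, [])).1 = shapeOf c := by
  induction t with
  | zero =>
    refine ⟨by omega, fun p q _ _ _ => rfl, by simp [surv, descR], rfl⟩
  | succ t ih =>
    have ih := ih (by omega)
    obtain ⟨ihA, ihF, ihQ, ihS⟩ := ih
    have hm0 : 0 < m := by omega
    have hdesc : descR m (t+1) = descR m t ++ [m - 1 - (t : Int)] := by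
      simp [descR, List.range_succ]
    set st := (descR m t).foldl (stepA y) (c, []) with hst
    have hfold : (descR m (t+1)).foldl (stepA y) (c, []) = stepA y st (m - 1 - (t : Int)) := by
      rw [hdesc, List.foldl_append, List.foldl_cons, List.foldl_nil]
    set r : Int := m - 1 - (t : Int) with hr
    have hr0 : 0 ≤ r := by omega
    have hread : bGet st.1 r y = bGet c r y := ihF r y hr0 hy (by omega)
    have hL : (surv c m y t).length ≤ t := surv_length_le c m y t
    set L := (surv c m y t).length with hLdef
    have hrowlen : ∀ k : Nat, k < m.toNat → y < ((st.1.getD k []).length : Int) := by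
      intro k hk; rw [rowlen_of_shapeOf ihS]; exact hrow k hk
    have hinr : ∀ x : Int, 0 ≤ x → x < m → inRangeB st.1 (x, y) := by
      intro x h0 h1
      exact ⟨h0, by rw [length_of_shapeOf ihS]; omega, hy, hrowlen x.toNat (by omega)⟩
    by_cases hv : bGet c r y = '0'
    · -- current cell is '0': push its position on the queue
      have hstep : stepA y st r = (st.1, st.2 ++ [(r, y)]) := by
        rw [stepA, if_pos (hread.trans hv)]
      have hsurv : surv c m y (t+1) = surv c m y t := by rw [surv_succ, if_pos hv, List.append_nil]
      rw [hfold, hstep]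
      refine ⟨?_, ?_, ?_, ihS⟩
      · intro k hk
        rcases Nat.lt_or_ge k t with h | h
        · rw [hsurv]; exact ihA k h
        · have hkt : k = t := by omega
          subst hkt
          rw [hsurv, hread, hv, List.getD_eq_default _ _ (by omega)]
      · intro p q h0 h1 h2
        exact ihF p q h0 h1 (by omega)
      · rw [hsurv, ihQ]
        have : t + 1 - L = (t - L) + 1 := by omega
        rw [this, List.range_succ, List.map_append]
        simp only [List.map_cons, List.map_nil]
        congr 2
        · congr 1; omega
    · -- current cell is not '0'
      have hsurv : surv c m y (t+1) = surv c m y t ++ [bGet c r y] := by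
        rw [surv_succ, if_neg hv]
      have hL1 : (surv c m y (t+1)).length = L + 1 := by rw [hsurv]; simp [← hLdef]
      rcases Nat.eq_zero_or_pos (t - L) with hd | hd
      · -- the queue is empty: nothing moves
        have hq : st.2 = [] := by rw [ihQ, hd]; simp
        have hstep : stepA y st r = st := by
          rw [stepA, if_neg (by rw [hread]; exact hv), hq]
        rw [hfold, hstep]
        refine ⟨?_, ?_, ?_, ihS⟩
        · intro k hk
          rcases Nat.lt_or_ge k t with h | h
          · rw [hsurv, List.getD_append _ _ _ _ (by omega), ihA k h]
          · have hkt : k = t := by omega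
            rw [hkt, show ((m:Int) - 1 - (t:Int)) = r from rfl, hread, hsurv,
               getD_concat _ _ _ _ (by omega)]
        · intro p q h0 h1 h2
          exact ihF p q h0 h1 (by omega)
        · rw [hq, hL1, show t + 1 - (L + 1) = 0 from by omega]
          simp
      · -- the queue is nonempty: the value drops to its lowest free slot
        obtain ⟨d, hdd⟩ : ∃ d, t - L = d + 1 := ⟨t - L - 1, by omega⟩
        have hq : st.2 = (m - 1 - ((L + 0 : Nat) : Int), y) ::
            (List.range d).map
              ((fun u => (m - 1 - ((L + u : Nat) : Int), y)) ∘ Nat.succ) := by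
          rw [ihQ, hdd, List.range_succ_eq_map, List.map_cons, List.map_map]
        set x0 : Int := m - 1 - ((L + 0 : Nat) : Int) with hx0
        have hx0' : x0 = m - 1 - (L : Int) := by rw [hx0]; norm_num
        have hstep : stepA y st r = (bSet (bSet st.1 x0 y (bGet st.1 r y)) r y '0',
            ((List.range d).map
              ((fun u => (m - 1 - ((L + u : Nat) : Int), y)) ∘ Nat.succ)) ++ [(r, y)]) := by
          rw [stepA, if_neg (by rw [hread]; exact hv), hq]
        have hLm : L < m.toNat := by omega
        have hx00 : 0 ≤ x0 := by rw [hx0']; omega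
        have hinr_x0 := hinr x0 hx00 (by rw [hx0']; omega)
        have hinr_r := hinr r hr0 (by omega)
        have hS1 : shapeOf (bSet st.1 x0 y (bGet st.1 r y)) = shapeOf st.1 :=
          shapeOf_bSet _ _ _ _ hx00 hy
        have hinr_r2 : inRangeB (bSet st.1 x0 y (bGet st.1 r y)) (r, y) :=
          inRange_of_shapeOf hS1.symm _ hinr_r
        have hget : ∀ p q : Int, 0 ≤ p → 0 ≤ q →
            bGet (stepA y st r).1 p q =
              if p = r ∧ q = y then '0'
              else if p = x0 ∧ q = y then bGet c r y else bGet st.1 p q := by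
          intro p q h0 h1
          rw [hstep]
          dsimp only
          rw [bGet_bSet _ _ _ _ _ _ hr0 hy h0 h1 hinr_r2.2.1 hinr_r2.2.2.2,
             bGet_bSet _ _ _ _ _ _ hx00 hy h0 h1 hinr_x0.2.1 hinr_x0.2.2.2, hread]
        rw [hfold]
        refine ⟨?_, ?_, ?_, ?_⟩
        · intro k hk
          rw [hget _ _ (by omega) hy]
          by_cases hkt : k = t
          · rw [if_pos ⟨by omega, rfl⟩, hsurv, hkt,
               List.getD_eq_default _ _ (by simp [← hLdef]; omega)]
          · rw [if_neg (by rintro ⟨h, -⟩; exact hkt (by omega))]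
            by_cases hkL : k = L
            · rw [if_pos ⟨by rw [hx0']; omega, rfl⟩, hsurv, hkL,
                 getD_concat _ _ _ _ hLdef]
            · rw [if_neg (by rintro ⟨h, -⟩; exact hkL (by rw [hx0'] at h; omega))]
              have h3 : k < t := by omega
              rw [ihA k h3, hsurv]
              rcases Nat.lt_or_ge k L with h4 | h4
              · rw [List.getD_append _ _ _ _ (by omega)]
              · rw [List.getD_eq_default _ _ (by omega),
                   List.getD_eq_default _ _ (by simp; omega)]
        · intro p q h0 h1 h2
          rw [hget p q h0 h1,
             if_neg (by rintro ⟨hp, rfl⟩; rcases h2 with h | h | h <;> omega),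
             if_neg (by rintro ⟨hp, rfl⟩; rw [hx0'] at hp; rcases h2 with h | h | h <;> omega)]
          exact ihF p q h0 h1 (by omega)
        · rw [hstep]
          dsimp only
          rw [hL1, show t + 1 - (L + 1) = d + 1 from by omega, List.range_succ, List.map_append]
          congr 1
          · apply List.map_congr_left
            intro u _
            simp only [Function.comp_apply]
            congr 3
            omega
          · simp only [List.map_cons, List.map_nil]
            congr 3
            omega
        · rw [hstep]
          dsimp only
          rw [shapeOf_bSet _ _ _ _ hr0 hy, hS1, ihS]

def ascR (t : Nat) : List Int := (List.range t).map (fun k => ((k : Nat) : Int))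

def stepB (m y : Int) (col : List Char) (b : List (List Char)) (i : Int) : List (List Char) :=
  bSet b (m-1-i) y (if i < (col.length : Int) then PySem.List.pyGetD col i '0' else '0')

theorem stepB_val (col : List Char) (k : Nat) :
    (if (k : Int) < (col.length : Int) then PySem.List.pyGetD col (k : Int) '0' else '0')
      = col.getD k '0' := by
  by_cases h : k < col.length
  · rw [if_pos (by omega), PySem.List.pyGetD_natCast]
  · rw [if_neg (by omega), List.getD_eq_default _ _ (by omega)]

theorem dropB_inv (m y : Int) (d : List (List Char)) (col : List Char) (hy : 0 ≤ y)
    (hml : m ≤ (d.length : Int))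
    (hrow : ∀ k : Nat, k < m.toNat → y < ((d.getD k []).length : Int))
    (t : Nat) (ht : t ≤ m.toNat) :
    (∀ k : Nat, k < t → bGet ((ascR t).foldl (stepB m y col) d) (m - 1 - (k : Int)) y
        = col.getD k '0')
    ∧ (∀ p q : Int, 0 ≤ p → 0 ≤ q → (q ≠ y ∨ p < m - t ∨ m ≤ p) →
        bGet ((ascR t).foldl (stepB m y col) d) p q = bGet d p q)
    ∧ shapeOf ((ascR t).foldl (stepB m y col) d) = shapeOf d := by
  induction t with
  | zero => exact ⟨by omega, fun p q _ _ _ => rfl, rfl⟩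
  | succ t ih =>
    obtain ⟨ihA, ihF, ihS⟩ := ih (by omega)
    have hm0 : 0 < m := by omega
    set st := (ascR t).foldl (stepB m y col) d with hst
    have hfold : (ascR (t+1)).foldl (stepB m y col) d = stepB m y col st (t : Int) := by
      rw [ascR, List.range_succ, List.map_append, List.foldl_append]
      rfl
    set r : Int := m - 1 - (t : Int) with hr
    have hr0 : 0 ≤ r := by omega
    have hinr : inRangeB st (r, y) := by
      refine ⟨hr0, by rw [length_of_shapeOf ihS]; omega, hy, ?_⟩
      rw [rowlen_of_shapeOf ihS]
      exact hrow r.toNat (by omega)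
    have hget : ∀ p q : Int, 0 ≤ p → 0 ≤ q →
        bGet (stepB m y col st (t : Int)) p q =
          if p = r ∧ q = y then col.getD t '0' else bGet st p q := by
      intro p q h0 h1
      rw [stepB, show m - 1 - (t : Int) = r from rfl,
         bGet_bSet _ _ _ _ _ _ hr0 hy h0 h1 hinr.2.1 hinr.2.2.2, stepB_val]
    rw [hfold]
    refine ⟨?_, ?_, ?_⟩
    · intro k hk
      rw [hget _ _ (by omega) hy]
      by_cases hkt : k = t
      · rw [if_pos ⟨by omega, rfl⟩, hkt]
      · rw [if_neg (by rintro ⟨h, -⟩; exact hkt (by omega))]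
        exact ihA k (by omega)
    · intro p q h0 h1 h2
      rw [hget p q h0 h1,
         if_neg (by rintro ⟨hp, rfl⟩; rcases h2 with h | h | h <;> omega)]
      exact ihF p q h0 h1 (by omega)
    · rw [stepB, shapeOf_bSet _ _ _ _ (by omega) hy, ihS]

-- the port-side helpers match the lists/steps used in the invariants
theorem pyRange_desc (m : Int) :
    PySem.List.pyRange (m-1) (-1) (-1) = descR m m.toNat := by
  rw [PySem.List.pyRange_neg_one, descR, show (m - 1 - (-1) : Int) = m from by ring]

theorem pyRange_asc (m : Int) : PySem.List.pyRange 0 m 1 = ascR m.toNat := by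
  rw [PySem.List.pyRange_one, ascR]
  simp

theorem gravColA_eq (m : Int) (b : List (List Char)) (y : Int) :
    gravColA m b y = ((descR m m.toNat).foldl (stepA y) (b, [])).1 := by
  rw [gravColA, pyRange_desc]
  rfl

theorem dropColB_eq (m : Int) (s : PySem.Set (Int × Int)) (b : List (List Char)) (y : Int) :
    dropColB m s b y = (ascR m.toNat).foldl (stepB m y (colListB m b s y)) b := by
  rw [dropColB, pyRange_asc]
  rfl

theorem colListB_eq_surv (m y : Int) (c d : List (List Char)) (s : PySem.Set (Int × Int))
    (hR : ∀ p : Int, 0 ≤ p → bGet c p y = if (p, y) ∈ s then '0' else bGet d p y) :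
    colListB m d s y = surv c m y m.toNat := by
  rw [colListB, pyRange_desc, surv]
  have hmem : ∀ r ∈ descR m m.toNat, 0 ≤ r := by
    intro r hr
    simp only [descR, List.mem_map, List.mem_range] at hr
    obtain ⟨k, hk, rfl⟩ := hr
    omega
  rw [List.filter_congr (q := fun r => bGet c r y != '0') ?hc]
  case hc =>
    intro r hr
    have h0 := hmem r hr
    by_cases hm : (r, y) ∈ s
    · simp [hR r h0, hm]
    · simp [hR r h0, hm]
  apply List.map_congr_left
  intro r hr
  rw [List.mem_filter] at hr
  have h0 := hmem r hr.1
  have hne : bGet c r y ≠ '0' := by simpa using hr.2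
  rw [hR r h0] at hne ⊢
  by_cases hm : (r, y) ∈ s
  · simp [hm] at hne
  · simp [hm]

theorem scan_bounds (m n : Int) (b : List (List Char)) :
    ∀ xy ∈ scan2x2 m n b, 0 ≤ xy.1 ∧ xy.1 < m ∧ 0 ≤ xy.2 ∧ xy.2 < n := by
  rw [scan2x2]
  refine List.foldlRecOn
    (motive := fun s : PySem.Set (Int × Int) => ∀ xy ∈ s, 0 ≤ xy.1 ∧ xy.1 < m ∧ 0 ≤ xy.2 ∧ xy.2 < n)
    _ _ (by intro xy h; cases h) ?_
  intro s hs i hi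
  refine List.foldlRecOn
    (motive := fun s : PySem.Set (Int × Int) => ∀ xy ∈ s, 0 ≤ xy.1 ∧ xy.1 < m ∧ 0 ≤ xy.2 ∧ xy.2 < n)
    _ _ hs ?_
  intro s' hs' j hj
  rw [PySem.List.mem_pyRange_one] at hi hj
  split_ifs with hc
  · intro xy hxy
    rw [PySem.Set.mem_update] at hxy
    rcases hxy with h | h
    · exact hs' xy h
    · simp only [List.mem_cons, List.not_mem_nil, or_false] at h
      rcases h with rfl | rfl | rfl | rfl <;> refine ⟨by omega, by omega, by omega, by omega⟩
  · exact hs'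

theorem scan_small (m n : Int) (b : List (List Char)) (h : m ≤ 1 ∨ n ≤ 1) :
    scan2x2 m n b = [] := by
  rw [scan2x2]
  rcases h with h | h
  · rw [PySem.List.pyRange_one_eq_nil (by omega : m - 1 ≤ 0)]
    rfl
  · rw [show PySem.List.pyRange 0 (n-1) 1 = [] from PySem.List.pyRange_one_eq_nil (by omega)]
    simp only [List.foldl_nil]
    rw [PySem.List.foldl_ignore]
    rfl

theorem gravColA_spec (m y : Int) (c : List (List Char)) (hy : 0 ≤ y)
    (hml : m ≤ (c.length : Int))
    (hrow : ∀ k : Nat, k < m.toNat → y < ((c.getD k []).length : Int)) :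
    (∀ p q : Int, 0 ≤ p → 0 ≤ q → (q ≠ y ∨ m ≤ p) → bGet (gravColA m c y) p q = bGet c p q)
    ∧ (∀ k : Nat, k < m.toNat →
        bGet (gravColA m c y) (m - 1 - (k : Int)) y = (surv c m y m.toNat).getD k '0')
    ∧ shapeOf (gravColA m c y) = shapeOf c := by
  have h := gravA_inv m y c hy hml hrow m.toNat le_rfl
  rw [gravColA_eq]
  refine ⟨fun p q h0 h1 h2 => h.2.1 p q h0 h1 ?_, h.1, h.2.2.2⟩
  rcases h2 with h3 | h3
  · exact Or.inl h3
  · exact Or.inr (Or.inr h3)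

theorem dropColB_spec (m y : Int) (d : List (List Char)) (s : PySem.Set (Int × Int))
    (hy : 0 ≤ y) (hml : m ≤ (d.length : Int))
    (hrow : ∀ k : Nat, k < m.toNat → y < ((d.getD k []).length : Int)) :
    (∀ p q : Int, 0 ≤ p → 0 ≤ q → (q ≠ y ∨ m ≤ p) → bGet (dropColB m s d y) p q = bGet d p q)
    ∧ (∀ k : Nat, k < m.toNat →
        bGet (dropColB m s d y) (m - 1 - (k : Int)) y = (colListB m d s y).getD k '0')
    ∧ shapeOf (dropColB m s d y) = shapeOf d := by
  have h := dropB_inv m y d (colListB m d s y) hy hml hrow m.toNat le_rfl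
  rw [dropColB_eq]
  refine ⟨fun p q h0 h1 h2 => h.2.1 p q h0 h1 ?_, h.1, h.2.2⟩
  rcases h2 with h3 | h3
  · exact Or.inl h3
  · exact Or.inr (Or.inr h3)

theorem colLoop (m n : Int) (b : List (List Char)) (s : PySem.Set (Int × Int))
    (hm : 2 ≤ m) (hn : 2 ≤ n)
    (hml : m ≤ (b.length : Int))
    (hrow : ∀ k : Nat, k < m.toNat → n ≤ ((b.getD k []).length : Int))
    (hs : ∀ xy ∈ s, 0 ≤ xy.1 ∧ xy.1 < m ∧ 0 ≤ xy.2 ∧ xy.2 < n)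
    (t : Nat) (ht : t ≤ n.toNat) :
    (∀ p q : Int, 0 ≤ p → 0 ≤ q → (t : Int) ≤ q →
        bGet ((ascR t).foldl (gravColA m) (clearL b s)) p q = bGet (clearL b s) p q
      ∧ bGet ((ascR t).foldl (dropColB m s) b) p q = bGet b p q)
    ∧ (∀ p q : Int, 0 ≤ p → 0 ≤ q → q < (t : Int) →
        bGet ((ascR t).foldl (gravColA m) (clearL b s)) p q
          = bGet ((ascR t).foldl (dropColB m s) b) p q)
    ∧ shapeOf ((ascR t).foldl (gravColA m) (clearL b s)) = shapeOf b
    ∧ shapeOf ((ascR t).foldl (dropColB m s) b) = shapeOf b := by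
  have hsr : ∀ xy ∈ s, inRangeB b xy := by
    intro xy hxy
    obtain ⟨h1, h2, h3, h4⟩ := hs xy hxy
    exact ⟨h1, by omega, h3, by have := hrow xy.1.toNat (by omega); omega⟩
  have hs0 : ∀ xy ∈ s, 0 ≤ xy.1 ∧ 0 ≤ xy.2 := fun xy hxy => ⟨(hs xy hxy).1, (hs xy hxy).2.2.1⟩
  have hshape_clear : shapeOf (clearL b s) = shapeOf b := shapeOf_clearL b s hs0
  have hclear : ∀ p q : Int, 0 ≤ p → 0 ≤ q →
      bGet (clearL b s) p q = if (p, q) ∈ s then '0' else bGet b p q :=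
    fun p q h0 h1 => bGet_clearL b s p q h0 h1 hsr
  induction t with
  | zero =>
    exact ⟨fun p q _ _ _ => ⟨rfl, rfl⟩, fun p q _ _ h => by omega, hshape_clear, rfl⟩
  | succ t ih =>
    obtain ⟨ihU, ihE, ihSA, ihSB⟩ := ih (by omega)
    set cA := (ascR t).foldl (gravColA m) (clearL b s) with hcA
    set cB := (ascR t).foldl (dropColB m s) b with hcB
    have hfoldA : (ascR (t+1)).foldl (gravColA m) (clearL b s) = gravColA m cA (t : Int) := by
      rw [ascR, List.range_succ, List.map_append, List.foldl_append]
      rfl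
    have hfoldB : (ascR (t+1)).foldl (dropColB m s) b = dropColB m s cB (t : Int) := by
      rw [ascR, List.range_succ, List.map_append, List.foldl_append]
      rfl
    set y : Int := (t : Int) with hydef
    have hy0 : 0 ≤ y := by omega
    have hyn : y < n := by omega
    have hmlA : m ≤ (cA.length : Int) := by rw [length_of_shapeOf ihSA]; exact hml
    have hmlB : m ≤ (cB.length : Int) := by rw [length_of_shapeOf ihSB]; exact hml
    have hrowA : ∀ k : Nat, k < m.toNat → y < ((cA.getD k []).length : Int) := by
      intro k hk; rw [rowlen_of_shapeOf ihSA]; have := hrow k hk; omega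
    have hrowB : ∀ k : Nat, k < m.toNat → y < ((cB.getD k []).length : Int) := by
      intro k hk; rw [rowlen_of_shapeOf ihSB]; have := hrow k hk; omega
    have hA := gravColA_spec m y cA hy0 hmlA hrowA
    have hB := dropColB_spec m y cB s hy0 hmlB hrowB
    have hR : ∀ p : Int, 0 ≤ p → bGet cA p y = if (p, y) ∈ s then '0' else bGet cB p y := by
      intro p h0
      rw [(ihU p y h0 hy0 (by omega)).1, (ihU p y h0 hy0 (by omega)).2, hclear p y h0 hy0]
    have hcols : colListB m cB s y = surv cA m y m.toNat := colListB_eq_surv m y cA cB s hR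
    have hcoleq : ∀ p : Int, 0 ≤ p → bGet (gravColA m cA y) p y = bGet (dropColB m s cB y) p y := by
      intro p h0
      rcases lt_or_ge p m with hpm | hpm
      · have hk : p = m - 1 - (((m - 1 - p).toNat : Nat) : Int) := by omega
        rw [hk, hA.2.1 _ (by omega), hB.2.1 _ (by omega), hcols]
      · rw [hA.1 p y h0 hy0 (Or.inr hpm), hB.1 p y h0 hy0 (Or.inr hpm),
           (ihU p y h0 hy0 (by omega)).1, (ihU p y h0 hy0 (by omega)).2, hclear p y h0 hy0,
           if_neg (fun hmem => by have := hs _ hmem; omega)]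
    rw [hfoldA, hfoldB]
    refine ⟨?_, ?_, ?_, ?_⟩
    · intro p q h0 h1 h2
      have hqy : q ≠ y := by omega
      rw [hA.1 p q h0 h1 (Or.inl hqy), hB.1 p q h0 h1 (Or.inl hqy)]
      exact ihU p q h0 h1 (by omega)
    · intro p q h0 h1 h2
      by_cases hqy : q = y
      · rw [hqy]; exact hcoleq p h0
      · rw [hA.1 p q h0 h1 (Or.inl hqy), hB.1 p q h0 h1 (Or.inl hqy)]
        exact ihE p q h0 h1 (by omega)
    · rw [hA.2.2, ihSA]
    · rw [hB.2.2, ihSB]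

theorem gravPhase_eq (m n : Int) (b : List (List Char)) (s : PySem.Set (Int × Int))
    (hm : 2 ≤ m) (hn : 2 ≤ n)
    (hml : m ≤ (b.length : Int))
    (hrow : ∀ k : Nat, k < m.toNat → n ≤ ((b.getD k []).length : Int))
    (hs : ∀ xy ∈ s, 0 ≤ xy.1 ∧ xy.1 < m ∧ 0 ≤ xy.2 ∧ xy.2 < n) :
    (PySem.List.pyRange 0 n 1).foldl (gravColA m) (clearL b s)
      = (PySem.List.pyRange 0 n 1).foldl (dropColB m s) b
    ∧ shapeOf ((PySem.List.pyRange 0 n 1).foldl (dropColB m s) b) = shapeOf b := by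
  rw [pyRange_asc n]
  obtain ⟨hU, hE, hSA, hSB⟩ := colLoop m n b s hm hn hml hrow hs n.toNat le_rfl
  refine ⟨boardExt (hSA.trans hSB.symm) ?_, hSB⟩
  intro p q
  rcases lt_or_ge (q : Int) n with hq | hq
  · exact hE p q (by omega) (by omega) (by omega)
  · have h1 := hU p q (by omega) (by omega) (by omega)
    rw [h1.1, h1.2, bGet_clearL b s p q (by omega) (by omega) (by
      intro xy hxy
      obtain ⟨a1, a2, a3, a4⟩ := hs xy hxy
      exact ⟨a1, by omega, a3, by have := hrow xy.1.toNat (by omega); omega⟩),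
      if_neg (fun hmem => by have := hs _ hmem; omega)]

def ShapeP (m n : Int) (b : List (List Char)) : Prop :=
  2 ≤ m → 2 ≤ n → (m ≤ (b.length : Int) ∧ ∀ k : Nat, k < m.toNat → n ≤ ((b.getD k []).length : Int))

theorem ShapeP_of_shapeOf {m n : Int} {b b' : List (List Char)}
    (h : shapeOf b' = shapeOf b) (hb : ShapeP m n b) : ShapeP m n b' := by
  intro h2 h3
  obtain ⟨h4, h5⟩ := hb h2 h3
  exact ⟨by rw [length_of_shapeOf h]; exact h4,
    fun k hk => by rw [rowlen_of_shapeOf h]; exact h5 k hk⟩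

theorem foldl_count (l : List (Int × Int)) (a : Int) :
    l.foldl (fun acc (_ : Int × Int) => acc + 1) a = a + (l.length : Int) := by
  induction l generalizing a with
  | nil => simp
  | cons x xs ih =>
    rw [List.foldl_cons, ih, List.length_cons]
    push_cast
    ring

theorem loopAB (fuel : Nat) : ∀ (m n : Int) (b : List (List Char)) (ans : Int),
    ShapeP m n b → loopA fuel m n b ans = loopB fuel m n b ans := by
  induction fuel with
  | zero => intro m n b ans _; rfl
  | succ fuel ih =>
    intro m n b ans hshape
    rw [loopA, loopB]
    by_cases hempty : (scan2x2 m n b).length = 0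
    · rw [if_pos hempty, if_pos hempty]
    · rw [if_neg hempty, if_neg hempty]
      have hmn : 2 ≤ m ∧ 2 ≤ n := by
        by_contra hc
        have hsm : m ≤ 1 ∨ n ≤ 1 := by
          by_cases h : m ≤ 1
          · exact Or.inl h
          · refine Or.inr ?_
            by_contra h2
            exact hc ⟨by omega, by omega⟩
        exact hempty (by rw [scan_small m n b hsm]; rfl)
      obtain ⟨hm2, hn2⟩ := hmn
      obtain ⟨hml, hrow⟩ := hshape hm2 hn2
      have hsb := scan_bounds m n b
      rw [PySem.List.foldl_prod_mk (f := fun b xy => bSet b xy.1 xy.2 '0')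
          (g := fun a (_ : Int × Int) => a + 1)]
      rw [foldl_count]
      obtain ⟨hboard, hshape'⟩ := gravPhase_eq m n b (scan2x2 m n b) hm2 hn2 hml hrow hsb
      show loopA fuel m n
          ((PySem.List.pyRange 0 n 1).foldl (gravColA m) (clearL b (scan2x2 m n b)))
          (ans + ((scan2x2 m n b).length : Int))
        = loopB fuel m n
          ((PySem.List.pyRange 0 n 1).foldl (dropColB m (scan2x2 m n b)) b)
          (ans + ((scan2x2 m n b).length : Int))
      rw [hboard]
      exact ih m n _ _ (ShapeP_of_shapeOf hshape' hshape)


-- ===== VERDICT (by name: the statement is the Claim_ definition above) =====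
theorem solution_spec : Claim_equal_solution := by
  intro m n board _ hpre
  unfold Spec_solution solution solution_alt
  apply loopAB
  intro hm2 hn2
  obtain ⟨h1, h2⟩ := hpre hm2 hn2
  refine ⟨by simpa using h1, ?_⟩
  intro k hk
  have hkb : k < board.length := by
    have : (m : Int) ≤ (board.length : Int) := h1
    omega
  rw [List.getD_eq_getElem?_getD, List.getElem?_map, List.getElem?_eq_getElem hkb]
  have hmem : board[k] ∈ board.take m.toNat := by
    have hg : (board.take m.toNat)[k]'(by simp; omega) = board[k] := List.getElem_take
    exact hg ▸ List.getElem_mem _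
  exact h2 _ hmem
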